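-- pv_equiv track=rewrite | github.com/JunseoChoJJ/codetree-TILs | 240802/최단 Run Length 인코딩/shortest-run-length-encoding.py | check_length
-- ===== SOURCE A (Python) =====
-- def check_length(a):
--     run_length=''
--
--     cnt = 1
--     for i in range(len(a)):
--         if i+1 == len(a):
--             run_length += a[i]
--             run_length += str(cnt)
--             break
--         if a[i] != a[i+1]:
--             run_length += a[i]
--             run_length += str(cnt)
--             cnt = 1
--         else:
--             cnt+=1
--     return len(run_length)
-- ===== SOURCE B (Python) =====
-- def check_length(a):
--     n = len(a)
--     bounds = [i + 1 for i in range(n) if i + 1 == n or a[i] != a[i + 1]]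
--     total = 0
--     prev = 0
--     for b in bounds:
--         total += 1 + len(str(b - prev))
--         prev = b
--     return total
-- ===== Notes on version B (the rewrite author's own statement) =====
-- stated objective: alternative
-- what changed: B never builds the encoded string: it collects the run-boundary indices in one comprehension and sums per-run contributions 1 + len(str(run length)) computed as differences of consecutive boundaries.
import Mathlib
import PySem

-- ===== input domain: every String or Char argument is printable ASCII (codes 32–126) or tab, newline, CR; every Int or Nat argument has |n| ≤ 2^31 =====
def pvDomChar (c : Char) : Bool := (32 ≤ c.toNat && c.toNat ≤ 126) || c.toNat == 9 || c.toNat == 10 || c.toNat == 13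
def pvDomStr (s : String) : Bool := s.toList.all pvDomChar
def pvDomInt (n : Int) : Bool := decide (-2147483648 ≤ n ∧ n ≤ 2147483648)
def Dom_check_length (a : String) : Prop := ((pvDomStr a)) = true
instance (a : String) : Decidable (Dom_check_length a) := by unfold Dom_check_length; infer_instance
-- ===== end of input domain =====

-- B never builds the encoded string: it sums per-run contributions derived from run-boundary indices.

-- ===== PORT A =====
-- A's for-loop over range(len(a)) with state (run_length, cnt); the `break` fires
-- only on the last index, ported as the first branch returning directly.
def check_length_loop (l : List Char) (i : Nat) (run_length : List Char) (cnt : Int) : List Char :=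
  if i < l.length then
    if i + 1 = l.length then
      run_length ++ [l.getD i ' '] ++ (PySem.Int.toStr cnt).toList
    else if l.getD i ' ' ≠ l.getD (i + 1) ' ' then
      check_length_loop l (i + 1) (run_length ++ [l.getD i ' '] ++ (PySem.Int.toStr cnt).toList) 1
    else
      check_length_loop l (i + 1) run_length (cnt + 1)
  else run_length
termination_by l.length - i

def check_length (a : String) : Int :=
  ((check_length_loop a.toList 0 [] 1).length : Int)

-- ===== PORT B =====
def check_length_alt (a : String) : Int :=
  let l := a.toList
  let n := l.length
  let bounds := ((List.range n).filter (fun i => i + 1 == n || l.getD i ' ' != l.getD (i + 1) ' ')).map (· + 1)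
  (bounds.foldl
    (fun (st : Int × Int) (b : Nat) =>
      (st.1 + 1 + ((PySem.Int.toStr ((b : Int) - st.2)).toList.length : Int), (b : Int)))
    ((0 : Int), (0 : Int))).1

-- ===== PRECONDITION & SPEC =====
def Spec_check_length (a : String) (out : Int) : Prop := out = check_length_alt a
instance (a : String) (out : Int) : Decidable (Spec_check_length a out) := by unfold Spec_check_length; infer_instance

-- ===== CLAIM (what is proved, stated in full; the proofs are below) =====
def Claim_equal_check_length : Prop := ∀ (a : String), Dom_check_length a → Spec_check_length a (check_length a)

-- ===== LEMMAS AND PROOFS =====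

-- contribution sum of a boundary list, with the previous boundary threaded through
def pvS (bs : List Nat) (p : Nat) : Int :=
  match bs with
  | [] => 0
  | b :: bs => 1 + ((PySem.Int.toStr ((b : Int) - (p : Int))).toList.length : Int) + pvS bs b

theorem pvS_foldl (bs : List Nat) (t p0 : Int) (p : Nat) (hp : p0 = (p : Int)) :
    (bs.foldl
      (fun (st : Int × Int) (b : Nat) =>
        (st.1 + 1 + ((PySem.Int.toStr ((b : Int) - st.2)).toList.length : Int), (b : Int)))
      (t, p0)).1 = t + pvS bs p := by
  induction bs generalizing t p0 p with
  | nil => simp [pvS]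
  | cons b bs ih =>
    simp only [List.foldl_cons]
    rw [ih _ _ b rfl, pvS, hp]
    ring

def pvBnds (l : List Char) (i : Nat) : List Nat :=
  ((List.range' i (l.length - i)).filter
      (fun j => j + 1 == l.length || l.getD j ' ' != l.getD (j + 1) ' ')).map (· + 1)

theorem pvKey (l : List Char) : ∀ k i (r : List Char) (prev : Nat),
    l.length - i = k → prev ≤ i →
    ((check_length_loop l i r ((i : Int) - (prev : Int) + 1)).length : Int)
      = (r.length : Int) + pvS (pvBnds l i) prev := by
  intro k
  induction k with
  | zero =>
    intro i r prev hk _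
    rw [check_length_loop, pvBnds, hk]
    have : ¬ i < l.length := by omega
    simp [this, pvS]
  | succ k ih =>
    intro i r prev hk hp
    have hi : i < l.length := by omega
    rw [check_length_loop, pvBnds]
    have hrange : List.range' i (l.length - i) = i :: List.range' (i + 1) (l.length - (i + 1)) := by
      have : l.length - i = (l.length - (i + 1)) + 1 := by omega
      rw [this, List.range'_succ]
    rw [hrange]
    by_cases hlast : i + 1 = l.length
    · simp only [if_pos hi, if_pos hlast, List.filter_cons,
        show ((fun j => j + 1 == l.length || l.getD j ' ' != l.getD (j + 1) ' ') i = true) by simp [hlast],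
        if_pos, List.map_cons, pvS]
      have h2 : ((i + 1 : Nat) : Int) - (prev : Int) = (i : Int) - (prev : Int) + 1 := by push_cast; omega
      rw [h2, show l.length - (i + 1) = 0 by omega]
      simp [pvS, List.length_append]
      omega
    · by_cases hne : l.getD i ' ' ≠ l.getD (i + 1) ' '
      · have hfilter : ((fun j => j + 1 == l.length || l.getD j ' ' != l.getD (j + 1) ' ') i = true) := by
          simp only [Bool.or_eq_true, bne_iff_ne, ne_eq, beq_iff_eq]
          exact Or.inr hne
        simp only [if_pos hi, if_neg hlast, if_pos hne, List.filter_cons, hfilter, if_pos,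
          List.map_cons, pvS]
        rw [show (1 : Int) = ((i + 1 : Nat) : Int) - ((i + 1 : Nat) : Int) + 1 by push_cast; ring,
          ih (i + 1) _ (i + 1) (by omega) (le_refl _), pvBnds]
        rw [show ((i + 1 : Nat) : Int) - (prev : Int) = (i : Int) - (prev : Int) + 1 by push_cast; omega]
        simp [List.length_append]
        ring
      · have hfilter : ((fun j => j + 1 == l.length || l.getD j ' ' != l.getD (j + 1) ' ') i = false) := by
          simp only [Bool.or_eq_false_iff, bne_eq_false_iff_eq, beq_eq_false_iff_ne, ne_eq]
          exact ⟨hlast, by simpa using hne⟩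
        simp only [if_pos hi, if_neg hlast, if_neg hne, List.filter_cons, hfilter,
          Bool.false_eq_true, if_neg, not_false_iff]
        rw [show ((i : Int) - (prev : Int) + 1) + 1 = ((i + 1 : Nat) : Int) - (prev : Int) + 1 by push_cast; ring,
          ih (i + 1) r prev (by omega) (by omega), pvBnds]

-- ===== VERDICT (by name: the statement is the Claim_ definition above) =====
theorem check_length_spec : Claim_equal_check_length := by
  intro a _
  unfold Spec_check_length check_length
  have hA := pvKey a.toList a.toList.length 0 [] 0 rfl (le_refl 0)
  rw [show ((0 : Nat) : Int) - ((0 : Nat) : Int) + 1 = (1 : Int) by norm_num] at hA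
  rw [hA]
  simp only [check_length_alt]
  rw [pvS_foldl _ _ _ 0 (by norm_num)]
  rw [show List.range a.toList.length = List.range' 0 (a.toList.length - 0) by
    simp [List.range_eq_range']]
  rw [← pvBnds]
  simp
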